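-- pv_equiv track=rewrite | github.com/MetaFFI/plugin-sdk | compiler/python3/host/type_mapper.py | metaffi_type_to_python_type_annotation
-- ===== SOURCE A (Python) =====
-- from typing import Any, Optional, List, Tuple
--
-- def metaffi_type_to_python_type_annotation(metaffi_type: str, dimensions: int = 0, type_alias: Optional[str] = None) -> str:
--     """
--     Convert MetaFFI type string to Python type annotation.
--
--     Args:
--         metaffi_type: MetaFFI type string (e.g., "int32", "string8", "handle")
--         dimensions: Number of array dimensions (0 = not an array)
--         type_alias: Optional type alias for handle types
--
--     Returns:
--         Python type annotation string (e.g., "int", "str", "List[int]", "Any")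
--     """
--     # Handle arrays
--     if dimensions > 0:
--         base_type = metaffi_type_to_python_type_annotation(metaffi_type, 0, type_alias)
--         # For multi-dimensional arrays, nest List types
--         result = base_type
--         for _ in range(dimensions):
--             result = f"List[{result}]"
--         return result
--
--     # Map base types
--     type_mapping = {
--         # Integers
--         "int8": "int",
--         "int16": "int",
--         "int32": "int",
--         "int64": "int",
--         "uint8": "int",
--         "uint16": "int",
--         "uint32": "int",
--         "uint64": "int",
--         # Floats
--         "float32": "float",
--         "float64": "float",
--         # Strings
--         "string8": "str",
--         "string16": "str",
--         "string32": "str",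
--         # Characters
--         "char8": "str",
--         "char16": "str",
--         "char32": "str",
--         # Boolean
--         "bool": "bool",
--         # Handle
--         "handle": type_alias if type_alias else "Any",
--         # Other
--         "any": "Any",
--         "null": "None",
--         "size": "int",
--     }
--
--     # Handle array types (e.g., "int32_array")
--     if metaffi_type.endswith("_array"):
--         base_type = metaffi_type[:-6]  # Remove "_array" suffix
--         base_annotation = type_mapping.get(base_type, "Any")
--         return f"List[{base_annotation}]"
--
--     return type_mapping.get(metaffi_type, "Any")
-- ===== SOURCE B (Python) =====
-- from typing import Optional
--
--
-- def metaffi_type_to_python_type_annotation(metaffi_type: str, dimensions: int = 0, type_alias: Optional[str] = None) -> str: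
--     # No dictionary and no recursion: parse the name into an alphabetic family and a
--     # numeric-width suffix, classify the (family, width) pair structurally, and build
--     # the nested List[...] wrapper in one closed-form string expression.
--     n = dimensions if dimensions > 0 else 0
--     if metaffi_type.endswith("_array"):
--         metaffi_type = metaffi_type[:-6]
--         n += 1
--     i = 0
--     while i < len(metaffi_type) and metaffi_type[i].isalpha():
--         i += 1
--     family, width = metaffi_type[:i], metaffi_type[i:]
--     if family in ("int", "uint") and width in ("8", "16", "32", "64"):
--         base = "int"
--     elif family == "float" and width in ("32", "64"):
--         base = "float"
--     elif family in ("string", "char") and width in ("8", "16", "32"):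
--         base = "str"
--     elif width == "":
--         if family == "bool":
--             base = "bool"
--         elif family == "handle":
--             base = type_alias if type_alias else "Any"
--         elif family == "null":
--             base = "None"
--         elif family == "size":
--             base = "int"
--         elif family == "any":
--             base = "Any"
--         else:
--             base = "Any"
--     else:
--         base = "Any"
--     return "List[" * n + base + "]" * n
-- ===== Notes on version B (the rewrite author's own statement) =====
-- stated objective: alternative
-- what changed: Replaces A's recursion and its lookup dictionary by structural parsing: the name is split into an alphabetic family and a numeric-width suffix, the (family, width) pair is classified by a closed rule set, and the List[...] nesting is emitted as one closed-form string concatenation instead of two separate wrapping paths.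
import Mathlib
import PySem

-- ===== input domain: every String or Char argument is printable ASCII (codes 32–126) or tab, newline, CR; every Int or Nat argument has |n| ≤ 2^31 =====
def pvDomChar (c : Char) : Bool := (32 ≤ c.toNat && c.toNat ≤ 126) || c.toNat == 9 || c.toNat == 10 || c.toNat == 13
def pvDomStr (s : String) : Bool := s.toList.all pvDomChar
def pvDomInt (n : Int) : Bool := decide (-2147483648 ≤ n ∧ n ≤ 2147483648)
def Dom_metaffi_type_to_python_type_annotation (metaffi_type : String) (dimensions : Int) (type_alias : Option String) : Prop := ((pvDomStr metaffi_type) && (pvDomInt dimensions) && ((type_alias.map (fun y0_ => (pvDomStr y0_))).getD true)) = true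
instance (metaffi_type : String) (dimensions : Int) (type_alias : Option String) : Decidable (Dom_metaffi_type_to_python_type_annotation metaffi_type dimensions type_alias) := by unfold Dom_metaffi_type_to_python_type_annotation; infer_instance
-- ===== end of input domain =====

-- B replaces A's recursion and dictionary by parsing the name into an alphabetic family plus a
-- numeric-width suffix, classifying that pair structurally, and emitting the List[...] nesting
-- as one closed-form string concatenation (objective: alternative / no lookup table).

-- ===== PORT A =====
-- Python 'type_alias if type_alias else "Any"' (None and "" are falsy); occurs in both Pythons.
def pvAliasAnn (type_alias : Option String) : String :=
  match type_alias with
  | some s => if s = "" then "Any" else s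
  | none => "Any"

-- A's 'type_mapping' dict literal
def pvTypeMapping (type_alias : Option String) : PySem.Dict String String :=
  PySem.Dict.ofList
    [("int8", "int"), ("int16", "int"), ("int32", "int"), ("int64", "int"),
     ("uint8", "int"), ("uint16", "int"), ("uint32", "int"), ("uint64", "int"),
     ("float32", "float"), ("float64", "float"),
     ("string8", "str"), ("string16", "str"), ("string32", "str"),
     ("char8", "str"), ("char16", "str"), ("char32", "str"),
     ("bool", "bool"),
     ("handle", pvAliasAnn type_alias),
     ("any", "Any"), ("null", "None"), ("size", "int")]

def metaffi_type_to_python_type_annotation (metaffi_type : String) (dimensions : Int) (type_alias : Option String) : String :=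
  if _h : dimensions > 0 then
    let base_type := metaffi_type_to_python_type_annotation metaffi_type 0 type_alias
    (PySem.List.pyRange 0 dimensions 1).foldl (fun result _ => "List[" ++ result ++ "]") base_type
  else
    let type_mapping := pvTypeMapping type_alias
    if PySem.Str.endswith metaffi_type "_array" then
      let base_type := PySem.Str.slice metaffi_type none (some (-6))
      "List[" ++ type_mapping.getD base_type "Any" ++ "]"
    else
      type_mapping.getD metaffi_type "Any"
termination_by dimensions.toNat
decreasing_by simp; omega

-- ===== PORT B =====
-- Python's 's * n' string repetition
def pvStrRep (s : String) : Nat → String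
  | 0 => ""
  | n + 1 => s ++ pvStrRep s n

-- B's family/width parse-and-classify chain (family = leading alphabetic run, width = the rest)
def pvClassify (cs : List Char) (type_alias : Option String) : String :=
  let fam := cs.takeWhile PySem.Chars.isalpha
  let wid := cs.dropWhile PySem.Chars.isalpha
  if (fam = "int".toList ∨ fam = "uint".toList) ∧
     (wid = "8".toList ∨ wid = "16".toList ∨ wid = "32".toList ∨ wid = "64".toList) then "int"
  else if fam = "float".toList ∧ (wid = "32".toList ∨ wid = "64".toList) then "float"
  else if (fam = "string".toList ∨ fam = "char".toList) ∧
     (wid = "8".toList ∨ wid = "16".toList ∨ wid = "32".toList) then "str"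
  else if wid = [] then
    if fam = "bool".toList then "bool"
    else if fam = "handle".toList then pvAliasAnn type_alias
    else if fam = "null".toList then "None"
    else if fam = "size".toList then "int"
    else if fam = "any".toList then "Any"
    else "Any"
  else "Any"

def metaffi_type_to_python_type_annotation_alt (metaffi_type : String) (dimensions : Int) (type_alias : Option String) : String :=
  let n : Nat := (if dimensions > 0 then dimensions else 0).toNat
  let p : String × Nat :=
    if PySem.Str.endswith metaffi_type "_array" then
      (PySem.Str.slice metaffi_type none (some (-6)), n + 1)
    else (metaffi_type, n)
  pvStrRep "List[" p.2 ++ pvClassify p.1.toList type_alias ++ pvStrRep "]" p.2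

-- ===== PRECONDITION & SPEC =====
def Spec_metaffi_type_to_python_type_annotation (metaffi_type : String) (dimensions : Int) (type_alias : Option String) (out : String) : Prop := out = metaffi_type_to_python_type_annotation_alt metaffi_type dimensions type_alias
instance (metaffi_type : String) (dimensions : Int) (type_alias : Option String) (out : String) : Decidable (Spec_metaffi_type_to_python_type_annotation metaffi_type dimensions type_alias out) := by unfold Spec_metaffi_type_to_python_type_annotation; infer_instance

-- ===== CLAIM =====
def Claim_equal_metaffi_type_to_python_type_annotation : Prop := ∀ (metaffi_type : String) (dimensions : Int) (type_alias : Option String), Dom_metaffi_type_to_python_type_annotation metaffi_type dimensions type_alias → Spec_metaffi_type_to_python_type_annotation metaffi_type dimensions type_alias (metaffi_type_to_python_type_annotation metaffi_type dimensions type_alias)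

-- ===== LEMMAS AND PROOFS =====

-- the 21 keys of A's table
def pvKeys : List String :=
  ["int8", "int16", "int32", "int64", "uint8", "uint16", "uint32", "uint64",
   "float32", "float64", "string8", "string16", "string32",
   "char8", "char16", "char32", "bool", "handle", "any", "null", "size"]

-- n-fold 'List[...]' wrapping, in A's fold order
def pvWrapN : Nat → String → String
  | 0, s => s
  | n + 1, s => pvWrapN n ("List[" ++ s ++ "]")

theorem pv_foldl_wrap (l : List Int) (s : String) :
    l.foldl (fun r _ => "List[" ++ r ++ "]") s = pvWrapN l.length s := by
  induction l generalizing s with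
  | nil => rfl
  | cons x t ih => simp [List.foldl, pvWrapN, ih]

theorem pv_rep_comm (s : String) (n : Nat) : pvStrRep s n ++ s = s ++ pvStrRep s n := by
  induction n with
  | zero => simp [pvStrRep, String.empty_append, String.append_empty]
  | succ n ih => simp only [pvStrRep, String.append_assoc, ih]

theorem pv_wrap_eq (n : Nat) (s : String) :
    pvWrapN n s = pvStrRep "List[" n ++ s ++ pvStrRep "]" n := by
  induction n generalizing s with
  | zero => simp [pvWrapN, pvStrRep, String.empty_append, String.append_empty]
  | succ n ih =>
    show pvWrapN n ("List[" ++ s ++ "]") = _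
    rw [ih, pvStrRep, pvStrRep, ← String.append_assoc, ← String.append_assoc, pv_rep_comm]
    simp only [String.append_assoc]

-- literal-dict normal form of A's table
theorem pv_mk_eq (a : Option String) : pvTypeMapping a = PySem.Dict.mk
    [("int8", "int"), ("int16", "int"), ("int32", "int"), ("int64", "int"),
     ("uint8", "int"), ("uint16", "int"), ("uint32", "int"), ("uint64", "int"),
     ("float32", "float"), ("float64", "float"),
     ("string8", "str"), ("string16", "str"), ("string32", "str"),
     ("char8", "str"), ("char16", "str"), ("char32", "str"),
     ("bool", "bool"),
     ("handle", pvAliasAnn a),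
     ("any", "Any"), ("null", "None"), ("size", "int")] := rfl

-- a non-key resolves to the default in A's table
set_option maxHeartbeats 1000000 in
theorem pv_getD_nonkey (ta : Option String) (k : String) (hk : k ∉ pvKeys) :
    (pvTypeMapping ta).getD k "Any" = "Any" := by
  simp only [pvKeys, List.mem_cons, List.not_mem_nil, or_false, not_or] at hk
  obtain ⟨h1, h2, h3, h4, h5, h6, h7, h8, h9, h10, h11, h12, h13, h14, h15, h16, h17, h18, h19, h20, h21⟩ := hk
  apply PySem.Dict.getD_of_not_contains
  rw [pv_mk_eq, PySem.Dict.contains_eq_decide_mem_keys, PySem.Dict.keys_mk]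
  simp only [List.map_cons, List.map_nil, List.mem_cons, List.not_mem_nil, or_false,
    decide_eq_false_iff_not, not_or]
  exact ⟨h1, h2, h3, h4, h5, h6, h7, h8, h9, h10, h11, h12, h13, h14, h15, h16, h17, h18, h19, h20, h21⟩

-- a non-key classifies to "Any" in B's chain
set_option maxHeartbeats 1000000 in
theorem pv_classify_nonkey (ta : Option String) (k : String) (hk : k ∉ pvKeys) :
    pvClassify k.toList ta = "Any" := by
  have hsplit : k.toList.takeWhile PySem.Chars.isalpha ++ k.toList.dropWhile PySem.Chars.isalpha
      = k.toList := List.takeWhile_append_dropWhile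
  have key_of : ∀ (f w : List Char),
      k.toList.takeWhile PySem.Chars.isalpha = f →
      k.toList.dropWhile PySem.Chars.isalpha = w →
      ∀ s : String, s.toList = f ++ w → k = s := by
    intro f w hf hw s hs
    apply String.toList_inj.mp
    rw [← hsplit, hf, hw, hs]
  have nk : ∀ s : String, s ∈ pvKeys → k ≠ s := fun s hs he => hk (he ▸ hs)
  unfold pvClassify
  dsimp only
  split_ifs with c1 c2 c3 c4 c5 c6 c7 c8 c9 <;> try rfl
  · obtain ⟨hf, hw⟩ := c1
    rcases hf with hf | hf <;> rcases hw with hw | hw | hw | hw <;>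
      [ exact absurd (key_of _ _ hf hw "int8" (by decide)) (nk _ (by decide));
        exact absurd (key_of _ _ hf hw "int16" (by decide)) (nk _ (by decide));
        exact absurd (key_of _ _ hf hw "int32" (by decide)) (nk _ (by decide));
        exact absurd (key_of _ _ hf hw "int64" (by decide)) (nk _ (by decide));
        exact absurd (key_of _ _ hf hw "uint8" (by decide)) (nk _ (by decide));
        exact absurd (key_of _ _ hf hw "uint16" (by decide)) (nk _ (by decide));
        exact absurd (key_of _ _ hf hw "uint32" (by decide)) (nk _ (by decide));
        exact absurd (key_of _ _ hf hw "uint64" (by decide)) (nk _ (by decide)) ]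
  · obtain ⟨hf, hw⟩ := c2
    rcases hw with hw | hw <;>
      [ exact absurd (key_of _ _ hf hw "float32" (by decide)) (nk _ (by decide));
        exact absurd (key_of _ _ hf hw "float64" (by decide)) (nk _ (by decide)) ]
  · obtain ⟨hf, hw⟩ := c3
    rcases hf with hf | hf <;> rcases hw with hw | hw | hw <;>
      [ exact absurd (key_of _ _ hf hw "string8" (by decide)) (nk _ (by decide));
        exact absurd (key_of _ _ hf hw "string16" (by decide)) (nk _ (by decide));
        exact absurd (key_of _ _ hf hw "string32" (by decide)) (nk _ (by decide));
        exact absurd (key_of _ _ hf hw "char8" (by decide)) (nk _ (by decide));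
        exact absurd (key_of _ _ hf hw "char16" (by decide)) (nk _ (by decide));
        exact absurd (key_of _ _ hf hw "char32" (by decide)) (nk _ (by decide)) ]
  · exact absurd (key_of _ _ c5 c4 "bool" (by decide)) (nk _ (by decide))
  · exact absurd (key_of _ _ c6 c4 "handle" (by decide)) (nk _ (by decide))
  · exact absurd (key_of _ _ c7 c4 "null" (by decide)) (nk _ (by decide))
  · exact absurd (key_of _ _ c8 c4 "size" (by decide)) (nk _ (by decide))

-- A's table lookup = B's parse-and-classify, at every string
set_option maxHeartbeats 1000000 in
theorem pv_base_eq (ta : Option String) (k : String) :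
    (pvTypeMapping ta).getD k "Any" = pvClassify k.toList ta := by
  by_cases hk : k ∈ pvKeys
  · simp only [pvKeys, List.mem_cons, List.not_mem_nil, or_false] at hk
    rcases hk with h | h | h | h | h | h | h | h | h | h | h | h | h | h | h | h | h | h | h | h | h <;>
      subst h <;> rfl
  · rw [pv_getD_nonkey ta k hk, pv_classify_nonkey ta k hk]

-- ===== VERDICT (by name: the statement is the Claim_ definition above) =====
theorem metaffi_type_to_python_type_annotation_spec : Claim_equal_metaffi_type_to_python_type_annotation := by
  intro mt d ta _
  unfold Spec_metaffi_type_to_python_type_annotation metaffi_type_to_python_type_annotation_alt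
  rw [metaffi_type_to_python_type_annotation]
  by_cases hd : d > 0
  · rw [dif_pos hd, metaffi_type_to_python_type_annotation, dif_neg (by omega : ¬ (0:Int) > 0)]
    by_cases he : PySem.Str.endswith mt "_array" = true
    · simp only [he, if_true, if_pos hd, pv_foldl_wrap, PySem.List.length_pyRange_one,
        pv_base_eq]
      rw [(by omega : (d - 0).toNat = d.toNat)]
      show pvWrapN (d.toNat + 1) (pvClassify (PySem.Str.slice mt none (some (-6))).toList ta) = _
      rw [pv_wrap_eq]
    · simp only [he, Bool.false_eq_true, if_false, if_pos hd, pv_foldl_wrap,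
        PySem.List.length_pyRange_one, pv_base_eq]
      rw [(by omega : (d - 0).toNat = d.toNat), pv_wrap_eq]
  · rw [dif_neg hd]
    have h0 : (if d > 0 then d else 0).toNat = 0 := by rw [if_neg hd]; rfl
    by_cases he : PySem.Str.endswith mt "_array" = true
    · simp only [he, if_true, h0, pv_base_eq, pvStrRep, String.append_empty,
        String.append_assoc]
    · simp only [he, Bool.false_eq_true, if_false, h0, pv_base_eq, pvStrRep,
      String.append_empty, String.empty_append]
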